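-- pv_equiv track=rewrite | github.com/jacquelineguo/CS5001 | Homework/HW 6/recipes.py | check_ingredients
-- ===== SOURCE A (Python) =====
-- EMPTY_STR = ""
--
-- def separate_ing(ing):
--     '''
--         Function -- separate_ing
--             Separate a string with comma and remove the beginning and
--             ending spaces
--         Parameters:
--             ing -- a string contains variety ingredients separate by comma
--         Returns:
--             A list with different ingredients as each element and removed the
--             beginning and ending spaces
--     '''
--     ing = ing.split(",")
--     ing_new = [item.strip() for item in ing]
--     return ing_new
--
-- def check_ingredients(ing):
--     '''
--         Function -- check_ingredients
--             Check if the user entered ingredients is valid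
--         Parameters:
--             ing -- a string contains variety ingredients separate by comma
--         Returns:
--             True if the user inputed ingredients list has at least one
--             none-empty element, False otherwise
--     '''
--     ing_lst = separate_ing(ing)
--     VALID_LEN = 1
--     IS_INVALID = len(ing_lst) < VALID_LEN or\
--         (len(ing_lst) == VALID_LEN and EMPTY_STR in ing_lst)
--     if IS_INVALID:
--         return False
--     for item in ing_lst:
--         if item != EMPTY_STR:
--             return True
--     return False
-- ===== SOURCE B (Python) =====
-- def check_ingredients(ing):
--     return any(c != "," and not c.isspace() for c in ing)
-- ===== Notes on version B (the rewrite author's own statement) =====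
-- stated objective: simpler
-- what changed: Replaces split-on-comma + strip-each-token + validity check + scan loop with a single character scan: the string contains a valid ingredient iff it contains some character that is neither a comma nor whitespace.
import Mathlib
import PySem

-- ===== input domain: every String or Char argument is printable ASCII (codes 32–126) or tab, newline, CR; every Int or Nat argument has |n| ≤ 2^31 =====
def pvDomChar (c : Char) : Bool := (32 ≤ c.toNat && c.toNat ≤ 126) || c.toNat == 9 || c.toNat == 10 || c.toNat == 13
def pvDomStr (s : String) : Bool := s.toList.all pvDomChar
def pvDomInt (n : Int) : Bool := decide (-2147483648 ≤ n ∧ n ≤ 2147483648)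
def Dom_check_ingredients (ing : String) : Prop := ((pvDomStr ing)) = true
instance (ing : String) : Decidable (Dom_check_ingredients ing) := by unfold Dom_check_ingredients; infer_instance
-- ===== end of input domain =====

-- B replaces A's split-on-comma / strip-each-token / validity-check / scan pipeline by a single
-- character scan (simpler decomposition, same O(n) cost).


-- ===== PORT A =====
-- separate_ing: ing.split(",") then strip each piece.  The separator "," is a nonempty
-- literal, so Python's split never raises; PySem.Str.split? is `some` there and `.getD []` is exact.
def separate_ing (ing : String) : List String :=
  let ing' := (PySem.Str.split? ing ",").getD []
  ing'.map PySem.Str.strip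

def check_ingredients (ing : String) : Bool :=
  let ing_lst := separate_ing ing
  let VALID_LEN : Int := 1
  let IS_INVALID : Bool :=
    decide ((ing_lst.length : Int) < VALID_LEN) ||
      (decide ((ing_lst.length : Int) = VALID_LEN) && ing_lst.contains "")
  if IS_INVALID then false
  else ing_lst.any (fun item => item != "")

-- ===== PORT B =====
def check_ingredients_alt (ing : String) : Bool :=
  ing.toList.any (fun c => !(c == ',') && !PySem.Chars.isspace c)

-- ===== PRECONDITION & SPEC =====
def Spec_check_ingredients (ing : String) (out : Bool) : Prop := out = check_ingredients_alt ing
instance (ing : String) (out : Bool) : Decidable (Spec_check_ingredients ing out) := by unfold Spec_check_ingredients; infer_instance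

-- ===== CLAIM (what is proved, stated in full; the proofs are below) =====
def Claim_equal_check_ingredients : Prop := ∀ (ing : String), Dom_check_ingredients ing → Spec_check_ingredients ing (check_ingredients ing)

-- ===== LEMMAS AND PROOFS =====

-- a stripped piece is empty iff the piece has no non-whitespace character
lemma strip_eq_nil_iff (t : List Char) :
    (PySem.Chars.strip t = []) ↔ (t.any (fun c => !PySem.Chars.isspace c) = false) := by
  simp [PySem.Chars.strip, PySem.Chars.lstrip, PySem.Chars.rstrip,
    List.dropWhile_eq_nil_iff, List.any_eq_false]
  constructor
  · intro h c hc
    rw [← List.takeWhile_append_dropWhile (p := PySem.Chars.isspace) (l := t)] at hc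
    rcases List.mem_append.mp hc with h1 | h2
    · exact List.mem_takeWhile_imp h1
    · exact h _ h2
  · intro h c hc
    exact h c (List.dropWhile_subset _ hc)

-- split always yields at least one piece (so A's `len < 1` branch never fires)
lemma splitOn_go_ne_nil (sep : List Char) (fuel : Nat) (l cur : List Char)
    (acc : List (List Char)) : PySem.Chars.splitOn.go sep fuel l cur acc ≠ [] := by
  induction fuel generalizing l cur acc with
  | zero => simp [PySem.Chars.splitOn.go.eq_def]
  | succ n ih =>
    rw [PySem.Chars.splitOn.go.eq_def]
    cases l with
    | nil => simp
    | cons c rest =>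
      simp only
      split
      · exact ih _ _ _
      · exact ih _ _ _

-- loop invariant: "some piece of the comma-split has a non-space char" = the character scan
lemma go_any_eq (fuel : Nat) (l cur : List Char) (acc : List (List Char))
    (h : l.length < fuel) :
    (PySem.Chars.splitOn.go [','] fuel l cur acc).any
        (fun t => t.any (fun c => !PySem.Chars.isspace c))
      = (acc.any (fun t => t.any (fun c => !PySem.Chars.isspace c))
          || cur.any (fun c => !PySem.Chars.isspace c)
          || l.any (fun c => !(c == ',') && !PySem.Chars.isspace c)) := by
  induction fuel generalizing l cur acc with
  | zero => omega
  | succ n ih =>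
    rw [PySem.Chars.splitOn.go.eq_def]
    cases l with
    | nil =>
      simp [List.any_reverse, Bool.or_comm]
    | cons c rest =>
      simp only
      split
      · rename_i hpre
        have hc : c = ',' := by
          simp [List.isPrefixOf] at hpre
          exact hpre.symm
        subst hc
        rw [List.length_singleton, List.drop_one, List.tail_cons]
        rw [ih _ _ _ (by simpa using Nat.lt_of_succ_lt_succ h)]
        simp [List.any_reverse, Bool.or_comm, Bool.or_left_comm]
      · rename_i hpre
        have hc : (c == ',') = false := by
          by_contra hcc
          simp at hcc
          subst hcc
          simp [List.isPrefixOf] at hpre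
        rw [ih _ _ _ (by simpa using Nat.lt_of_succ_lt_succ h)]
        simp [hc, Bool.or_assoc, Bool.or_comm, Bool.or_left_comm]

-- ===== VERDICT (by name: the statement is the Claim_ definition above) =====
theorem check_ingredients_spec : Claim_equal_check_ingredients := by
  intro ing _
  show check_ingredients ing = check_ingredients_alt ing
  unfold check_ingredients separate_ing check_ingredients_alt
  have hsplit : (PySem.Str.split? ing ",").getD []
      = (PySem.Chars.splitOn ing.toList [',']).map String.ofList := by
    simp [PySem.Str.split?, PySem.Chars.split?]
  rw [hsplit]
  set L := PySem.Chars.splitOn ing.toList [','] with hL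
  have hLne : L ≠ [] := splitOn_go_ne_nil _ _ _ _ _
  have hmap : (L.map String.ofList).map PySem.Str.strip
      = L.map (fun t => String.ofList (PySem.Chars.strip t)) := by
    simp [List.map_map, Function.comp, PySem.Str.strip]
  rw [hmap]
  have hany : (L.map (fun t => String.ofList (PySem.Chars.strip t))).any (fun item => item != "")
      = L.any (fun t => t.any (fun c => !PySem.Chars.isspace c)) := by
    rw [List.any_map]
    apply PySem.List.any_congr_mem
    intro t _
    simp only [Function.comp]
    by_cases hs : PySem.Chars.strip t = []
    · rw [(strip_eq_nil_iff t).mp hs, hs]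
      simp [← String.ofList_nil]
    · have ht : (t.any fun c => !PySem.Chars.isspace c) = true := by
        by_contra hf
        exact hs ((strip_eq_nil_iff t).mpr (Bool.eq_false_iff.mpr hf))
      rw [ht, bne_iff_ne, ne_eq, ← String.ofList_nil, String.ofList_inj]
      simpa using hs
  have hscan : L.any (fun t => t.any (fun c => !PySem.Chars.isspace c))
      = ing.toList.any (fun c => !(c == ',') && !PySem.Chars.isspace c) := by
    rw [hL]
    unfold PySem.Chars.splitOn
    rw [go_any_eq _ _ _ _ (by omega)]
    simp
  simp only
  split
  · rename_i hinv
    rw [← hscan]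
    symm
    simp only [Bool.or_eq_true, Bool.and_eq_true, decide_eq_true_eq, List.length_map] at hinv
    rcases hinv with h1 | ⟨h1, h2⟩
    · exact absurd (List.length_eq_zero_iff.mp (by omega)) hLne
    · have hlen : L.length = 1 := by omega
      obtain ⟨t, ht⟩ := List.length_eq_one_iff.mp hlen
      rw [ht] at h2 ⊢
      simp only [List.map_cons, List.map_nil, List.contains_cons, List.contains_nil,
        Bool.or_false, beq_iff_eq] at h2
      have hs : PySem.Chars.strip t = [] := by
        rw [← String.ofList_inj, String.ofList_nil]
        exact h2.symm
      simp only [List.any_cons, List.any_nil, Bool.or_false]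
      exact (strip_eq_nil_iff t).mp hs
  · rw [hany, hscan]
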